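-- pv_equiv track=rewrite | github.com/hellux/aoc-solutions | 2016/day06_noise/solution.py | cancel_noise
-- ===== SOURCE A (Python) =====
-- from operator import itemgetter
--
-- def count_freq(string):
--     freqs = {}
--     for char in string:
--         if char in freqs: freqs[char] += 1
--         else: freqs[char] = 1
--     return freqs
--
-- def cancel_noise(data, frequent=True):
--     noise_cancelled = ''
--     for chars in zip(*data):
--         most_frequent = sorted(count_freq(chars).items(),
--                                key=itemgetter(1),
--                                reverse=frequent)[0][0]
--         noise_cancelled += most_frequent
--     return noise_cancelled
-- ===== SOURCE B (Python) =====
-- def cancel_noise(data, frequent=True):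
--     out = []
--     for chars in zip(*data):
--         counts = {}
--         for c in chars:
--             counts[c] = counts.get(c, 0) + 1
--         pick = max(counts, key=counts.get) if frequent else min(counts, key=counts.get)
--         out.append(pick)
--     return ''.join(out)
-- ===== Notes on version B (the rewrite author's own statement) =====
-- stated objective: simpler
-- what changed: Per column, replace sorting the frequency items and taking the head with a single linear max/min pass over the insertion-ordered count dict (same stable tie-break: first-appearing extremal char); output built via a list and join instead of string +=.
import Mathlib
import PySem

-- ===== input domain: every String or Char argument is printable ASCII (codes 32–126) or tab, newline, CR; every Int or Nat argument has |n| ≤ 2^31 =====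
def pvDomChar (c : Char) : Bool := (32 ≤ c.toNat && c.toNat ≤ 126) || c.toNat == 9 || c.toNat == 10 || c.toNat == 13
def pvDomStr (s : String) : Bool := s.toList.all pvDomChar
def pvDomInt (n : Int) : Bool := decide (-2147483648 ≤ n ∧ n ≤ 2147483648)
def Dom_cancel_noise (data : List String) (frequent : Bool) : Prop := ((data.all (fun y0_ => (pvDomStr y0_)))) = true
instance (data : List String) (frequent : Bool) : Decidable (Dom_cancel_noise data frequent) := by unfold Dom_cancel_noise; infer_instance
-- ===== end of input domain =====

-- B: per column, a single linear max/min pass over the insertion-ordered count dict replaces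
-- sorting the items and taking the head (same value, including the stable first-appearance tie-break).

-- ===== PORT A =====
-- zip(*data): columns up to the shortest string's length (zip of zero iterables is empty: min? [] = none, getD 0).
-- Both Pythons call this same builtin; the in-range .getD default ' ' is never used.
def pyZipStar (data : List String) : List (List Char) :=
  (List.range (((data.map (fun s => s.toList.length)).min?).getD 0)).map
    (fun i => data.map (fun s => s.toList.getD i ' '))

-- count_freq: 'if char in freqs: freqs[char] += 1 else: freqs[char] = 1'
def count_freq (s : List Char) : PySem.Dict Char Int :=
  s.foldl (fun d c => if d.contains c then d.insert c (d.getD c 0 + 1) else d.insert c 1)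
    PySem.Dict.empty

-- 'sorted(count_freq(chars).items(), key=itemgetter(1), reverse=frequent)[0][0]'; the [0] index is
-- always in range (each column is nonempty), so the .headD default (' ', 0) is never used.
def cancel_noise (data : List String) (frequent : Bool) : String :=
  String.mk ((pyZipStar data).foldl (fun acc chars =>
    acc ++ [((PySem.List.sorted (count_freq chars).items (fun p => p.2) frequent).headD (' ', 0)).1]) [])

-- ===== PORT B =====
-- max/min(counts, key=counts.get): first extremal key in insertion order; counts is nonempty
-- (each column is nonempty), so the .getD default ' ' is never used.
def cancel_noise_alt (data : List String) (frequent : Bool) : String :=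
  String.mk ((pyZipStar data).foldl (fun acc chars =>
    let counts := chars.foldl (fun d c => d.insert c (d.getD c 0 + 1)) (PySem.Dict.empty : PySem.Dict Char Int)
    let pick := (if frequent then PySem.List.max? counts.keys (fun k => counts.getD k 0)
                 else PySem.List.min? counts.keys (fun k => counts.getD k 0)).getD ' '
    acc ++ [pick]) [])

-- ===== PRECONDITION & SPEC =====
def Spec_cancel_noise (data : List String) (frequent : Bool) (out : String) : Prop := out = cancel_noise_alt data frequent
instance (data : List String) (frequent : Bool) (out : String) : Decidable (Spec_cancel_noise data frequent out) := by unfold Spec_cancel_noise; infer_instance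

-- ===== CLAIM (what is proved, stated in full; the proofs are below) =====
def Claim_equal_cancel_noise : Prop := ∀ (data : List String) (frequent : Bool), Dom_cancel_noise data frequent → Spec_cancel_noise data frequent (cancel_noise data frequent)

-- ===== LEMMAS AND PROOFS =====

-- ===== VERDICT (by name: the statement is the Claim_ definition above) =====
-- head of insertBy: x lands in front iff it beats the old head
lemma head?_insertBy {α : Type} (before : α → α → Bool) (x : α) (acc : List α) :
    (PySem.List.insertBy before x acc).head? =
      some (match acc.head? with
            | none => x
            | some m => if before x m then x else m) := by
  cases acc with
  | nil => rfl
  | cons y ys => simp only [PySem.List.insertBy, List.head?_cons]; split <;> simp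

-- head of an insertion-sort fold is the running first-extremal fold
lemma head?_foldl_insertBy {α : Type} (before : α → α → Bool) (l : List α) (acc : List α) :
    (l.foldl (fun a x => PySem.List.insertBy before x a) acc).head? =
      l.foldl (fun m x =>
        some (match m with
              | none => x
              | some m => if before x m then x else m)) acc.head? := by
  induction l generalizing acc with
  | nil => rfl
  | cons x t ih => simp only [List.foldl_cons, ih, head?_insertBy]

-- head of the stable ascending sort is the FIRST minimal element
lemma head?_sorted_eq_min? {α : Type} (l : List α) (key : α → Int) :
    (PySem.List.sorted l key false).head? = PySem.List.min? l key := by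
  rw [PySem.List.sorted_eq_foldl_insertBy, head?_foldl_insertBy]
  simp only [PySem.List.min?]
  apply PySem.List.foldl_congr_mem
  intro m x _
  cases m with
  | none => rfl
  | some v => by_cases h : key x < key v <;> simp [h]

-- head of the stable descending sort is the FIRST maximal element
lemma head?_sorted_rev_eq_max? {α : Type} (l : List α) (key : α → Int) :
    (PySem.List.sorted l key true).head? = PySem.List.max? l key := by
  rw [PySem.List.sorted_rev_eq_foldl_insertBy, head?_foldl_insertBy]
  simp only [PySem.List.max?]
  apply PySem.List.foldl_congr_mem
  intro m x _
  cases m with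
  | none => rfl
  | some v => by_cases h : key v < key x <;> simp [h]

-- the running-minimum fold commutes with map (generalized accumulator)
lemma foldl_pick_min_map {α β : Type} (g : α → β) (key : β → Int) (l : List α) (acc : Option α) :
    (l.map g).foldl (fun m x => match m with
        | none => some x | some m => if key x < key m then some x else some m) (acc.map g) =
      (l.foldl (fun m x => match m with
        | none => some x | some m => if key (g x) < key (g m) then some x else some m) acc).map g := by
  induction l generalizing acc with
  | nil => rfl
  | cons x t ih =>
      simp only [List.map_cons, List.foldl_cons]
      rw [← ih]
      congr 1
      cases acc with
      | none => rfl
      | some m => by_cases hc : key (g x) < key (g m) <;> simp [hc]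

lemma foldl_pick_max_map {α β : Type} (g : α → β) (key : β → Int) (l : List α) (acc : Option α) :
    (l.map g).foldl (fun m x => match m with
        | none => some x | some m => if key m < key x then some x else some m) (acc.map g) =
      (l.foldl (fun m x => match m with
        | none => some x | some m => if key (g m) < key (g x) then some x else some m) acc).map g := by
  induction l generalizing acc with
  | nil => rfl
  | cons x t ih =>
      simp only [List.map_cons, List.foldl_cons]
      rw [← ih]
      congr 1
      cases acc with
      | none => rfl
      | some m => by_cases hc : key (g m) < key (g x) <;> simp [hc]

-- min?/max? commute with map
lemma min?_map {α β : Type} (g : α → β) (l : List α) (key : β → Int) :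
    PySem.List.min? (l.map g) key = (PySem.List.min? l (fun a => key (g a))).map g := by
  simpa using foldl_pick_min_map g key l none

lemma max?_map {α β : Type} (g : α → β) (l : List α) (key : β → Int) :
    PySem.List.max? (l.map g) key = (PySem.List.max? l (fun a => key (g a))).map g := by
  simpa using foldl_pick_max_map g key l none

-- A's hand-rolled frequency dict is Counter(cs)
lemma count_freq_eq_counter (cs : List Char) : count_freq cs = PySem.Dict.counter cs := by
  rw [count_freq, PySem.Dict.counter_eq_foldl]
  apply PySem.List.foldl_congr_mem
  intro d c _
  by_cases hc : d.contains c
  · simp [PySem.Dict.modify, hc]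
  · have h0 : d.getD c 0 = 0 := PySem.Dict.getD_of_not_contains d 0 (by simpa using hc)
    simp [PySem.Dict.modify, h0]

-- every column of zip(*data) is nonempty
lemma mem_pyZipStar_ne_nil {data : List String} {cs : List Char} (h : cs ∈ pyZipStar data) :
    cs ≠ [] := by
  unfold pyZipStar at h
  obtain ⟨i, hi, rfl⟩ := List.mem_map.mp h
  cases data with
  | nil => simp at hi
  | cons s t => simp

-- per nonempty column: head of the sorted items = the first extremal key of the count dict
lemma pick_eq (cs : List Char) (h : cs ≠ []) (frequent : Bool) :
    ((PySem.List.sorted (PySem.Dict.counter cs).items (fun p : Char × Int => p.2) frequent).headD (' ', 0)).1 =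
      (if frequent then PySem.List.max? (PySem.Dict.counter cs).keys (fun k => (PySem.Dict.counter cs).getD k 0)
       else PySem.List.min? (PySem.Dict.counter cs).keys (fun k => (PySem.Dict.counter cs).getD k 0)).getD ' ' := by
  have hS : PySem.Set.ofList cs ≠ [] := by
    cases cs with
    | nil => exact absurd rfl h
    | cons c t =>
        intro hnil
        have hm : c ∈ PySem.Set.ofList (c :: t) := (PySem.Set.mem_ofList _ _).mpr (List.mem_cons_self ..)
        rw [hnil] at hm
        exact List.not_mem_nil hm
  have hitems := PySem.Dict.items_counter (xs := cs)
  have hkeys := PySem.Dict.keys_counter (xs := cs)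
  have hgetD : (fun k => (PySem.Dict.counter cs).getD k 0) = (fun k : Char => (cs.count k : Int)) :=
    funext fun k => PySem.Dict.getD_counter ..
  rw [hitems, hkeys, hgetD]
  cases frequent with
  | true =>
      rw [if_pos rfl, List.headD_eq_head?_getD, head?_sorted_rev_eq_max?,
          max?_map (fun k : Char => (k, (cs.count k : Int))) _ (fun p : Char × Int => p.2)]
      cases hmx : PySem.List.max? (PySem.Set.ofList cs) (fun a => (cs.count a : Int)) with
      | none => exact absurd ((PySem.List.max?_eq_none_iff _ _).mp hmx) hS
      | some m => rfl
  | false =>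
      rw [if_neg (by simp), List.headD_eq_head?_getD, head?_sorted_eq_min?,
          min?_map (fun k : Char => (k, (cs.count k : Int))) _ (fun p : Char × Int => p.2)]
      cases hmn : PySem.List.min? (PySem.Set.ofList cs) (fun a => (cs.count a : Int)) with
      | none => exact absurd ((PySem.List.min?_eq_none_iff _ _).mp hmn) hS
      | some m => rfl

theorem cancel_noise_spec : Claim_equal_cancel_noise := by
  intro data frequent _
  unfold Spec_cancel_noise cancel_noise cancel_noise_alt
  congr 1
  rw [PySem.List.foldl_append_singleton_eq_map, PySem.List.foldl_append_singleton_eq_map]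
  simp only [List.nil_append]
  apply List.map_congr_left
  intro cs hcs
  rw [count_freq_eq_counter, PySem.Dict.foldl_insert_getD_add_one_eq_counter cs]
  exact pick_eq cs (mem_pyZipStar_ne_nil hcs) frequent
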